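-- pv_equiv track=rewrite | github.com/Teeeeg/AlgorithmOA | ACE/binay search/7search_min_diff_element.py | search_min_diff_element
-- ===== SOURCE A (Python) =====
-- def search_min_diff_element(arr, key):
--     if key < arr[0]:
--         return arr[0]
--     if key > arr[-1]:
--         return arr[-1]
--
--     n = len(arr)
--     start, end = 0, n-1
--
--     while start <= end:
--         mid = (start+end) // 2
--         if arr[mid] == key:
--             return arr[mid]
--         if arr[mid] < key:
--             start = mid+1
--         else:
--             end = mid-1
--
--     if abs(arr[start]-key) < abs(arr[end]-key):
--         return arr[start]
--
--     return arr[end]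
-- ===== SOURCE B (Python) =====
-- def search_min_diff_element(arr, key):
--     if key < arr[0]:
--         return arr[0]
--     if key > arr[-1]:
--         return arr[-1]
--
--     def go(sub, below, above):
--         # below/above: the nearest values probed so far on each side of key
--         if not sub:
--             return above if abs(above - key) < abs(below - key) else below
--         mid = (len(sub) - 1) // 2
--         v = sub[mid]
--         if v == key:
--             return v
--         if v < key:
--             return go(sub[mid + 1:], v, above)
--         return go(sub[:mid], below, v)
--
--     return go(arr, arr[0], arr[-1])
-- ===== Notes on version B (the rewrite author's own statement) =====
-- stated objective: alternative
-- what changed: The imperative while-loop with mutable start/end indices into the whole array is replaced by a divide-and-conquer recursion on list slices that carries the nearest probed values below and above the key instead of reading arr[start]/arr[end] after the loop.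
import Mathlib
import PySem

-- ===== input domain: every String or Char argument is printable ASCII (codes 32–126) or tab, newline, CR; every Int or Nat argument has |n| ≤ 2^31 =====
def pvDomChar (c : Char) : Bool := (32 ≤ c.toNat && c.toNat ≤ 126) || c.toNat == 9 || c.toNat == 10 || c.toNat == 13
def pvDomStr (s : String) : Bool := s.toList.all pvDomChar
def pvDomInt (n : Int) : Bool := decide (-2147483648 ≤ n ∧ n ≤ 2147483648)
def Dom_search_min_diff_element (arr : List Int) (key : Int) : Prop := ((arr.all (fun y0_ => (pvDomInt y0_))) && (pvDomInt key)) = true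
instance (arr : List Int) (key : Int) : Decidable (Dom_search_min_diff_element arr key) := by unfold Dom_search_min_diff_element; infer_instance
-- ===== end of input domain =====

-- B replaces A's while-loop over mutable start/end indices by a divide-and-conquer
-- recursion on list slices carrying the nearest probed values below/above the key
-- (objective: alternative decomposition, same probe sequence). Return-value equivalence only.

-- ===== PORT A =====
-- the while loop of A: state (start, end); early return on arr[mid] == key;
-- after the loop the tie-break on arr[start] / arr[end]
def aLoop (arr : List Int) (key s e : Int) : Int :=
  if _h : s ≤ e then
    let mid := PySem.Int.floordiv (s + e) 2
    let v := PySem.List.pyGetD arr mid 0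
    if v == key then v
    else if v < key then aLoop arr key (mid + 1) e
    else aLoop arr key s (mid - 1)
  else
    if |PySem.List.pyGetD arr s 0 - key| < |PySem.List.pyGetD arr e 0 - key| then
      PySem.List.pyGetD arr s 0
    else
      PySem.List.pyGetD arr e 0
termination_by (e + 1 - s).toNat
decreasing_by
  · have := PySem.Int.floordiv_two_mid_bounds _h
    omega
  · have := PySem.Int.floordiv_two_mid_bounds _h
    omega

def search_min_diff_element (arr : List Int) (key : Int) : Int :=
  if key < PySem.List.pyGetD arr 0 0 then PySem.List.pyGetD arr 0 0
  else if key > PySem.List.pyGetD arr (-1) 0 then PySem.List.pyGetD arr (-1) 0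
  else aLoop arr key 0 ((arr.length : Int) - 1)

-- ===== PORT B =====
-- Source B's go(sub, below, above): recursion on slices with the two side candidates
def goB (key : Int) (sub : List Int) (below above : Int) : Int :=
  if _h : sub.isEmpty then
    if |above - key| < |below - key| then above else below
  else
    let mid := PySem.Int.floordiv ((sub.length : Int) - 1) 2
    let v := PySem.List.pyGetD sub mid 0
    if v == key then v
    else if v < key then goB key (PySem.List.slice sub (some (mid + 1)) none) v above
    else goB key (PySem.List.slice sub none (some mid)) below v
termination_by sub.length
decreasing_by
  · have hne : sub ≠ [] := by simpa [List.isEmpty_iff] using _h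
    have hpos : 0 < sub.length := List.length_pos_iff.mpr hne
    have hmid := PySem.Int.floordiv_two_mid_bounds (show (0:Int) ≤ (sub.length : Int) - 1 by omega)
    rw [zero_add] at hmid
    rw [PySem.List.slice_from sub (by omega)]
    simp only [List.length_drop]
    omega
  · have hne : sub ≠ [] := by simpa [List.isEmpty_iff] using _h
    have hpos : 0 < sub.length := List.length_pos_iff.mpr hne
    have hmid := PySem.Int.floordiv_two_mid_bounds (show (0:Int) ≤ (sub.length : Int) - 1 by omega)
    rw [zero_add] at hmid
    rw [PySem.List.slice_to sub (by omega)]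
    simp only [List.length_take]
    omega

def search_min_diff_element_alt (arr : List Int) (key : Int) : Int :=
  if key < PySem.List.pyGetD arr 0 0 then PySem.List.pyGetD arr 0 0
  else if key > PySem.List.pyGetD arr (-1) 0 then PySem.List.pyGetD arr (-1) 0
  else goB key arr (PySem.List.pyGetD arr 0 0) (PySem.List.pyGetD arr (-1) 0)

-- ===== PRECONDITION & SPEC =====
-- Pre_ excludes only the empty list, on which Python A raises IndexError at arr[0].
def Pre_search_min_diff_element (arr : List Int) (key : Int) : Prop := arr ≠ []
instance (arr : List Int) (key : Int) : Decidable (Pre_search_min_diff_element arr key) := by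
  unfold Pre_search_min_diff_element; infer_instance

def pvWitness_search_min_diff_element : List Int × Int := ([1, 3, 8, 10], 6)

def Spec_search_min_diff_element (arr : List Int) (key : Int) (out : Int) : Prop := out = search_min_diff_element_alt arr key
instance (arr : List Int) (key : Int) (out : Int) : Decidable (Spec_search_min_diff_element arr key out) := by unfold Spec_search_min_diff_element; infer_instance

-- ===== CLAIM (what is proved, stated in full; the proofs are below) =====
def Claim_equal_search_min_diff_element : Prop := ∀ (arr : List Int) (key : Int), Dom_search_min_diff_element arr key → Pre_search_min_diff_element arr key → Spec_search_min_diff_element arr key (search_min_diff_element arr key)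

-- ===== LEMMAS AND PROOFS =====

-- indexing a drop/take window of arr is indexing arr at the shifted position
theorem pyGetD_drop_take (arr : List Int) (s L i : Int)
    (hs : 0 ≤ s) (h0 : 0 ≤ i) (hiL : i < L) (hle : s + L ≤ (arr.length : Int)) :
    PySem.List.pyGetD ((arr.drop s.toNat).take L.toNat) i 0 = PySem.List.pyGetD arr (s + i) 0 := by
  rw [PySem.List.pyGetD_eq_getElem _ 0 h0
        (by simp only [List.length_take, List.length_drop]; omega),
      PySem.List.pyGetD_eq_getElem arr 0 (by omega) (by omega)]
  simp only [List.getElem_take, List.getElem_drop]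
  congr 1
  omega

-- Core invariant: with the guards established, A's loop from state (s, e) equals
-- B's recursion on the window arr[s : e+1] provided `below`/`above` hold the
-- neighbours arr[s-1] / arr[e+1] whenever the exit can read them.
theorem loop_eq_goB (arr : List Int) (key : Int)
    (hg0 : PySem.List.pyGetD arr 0 0 ≤ key)
    (hg1 : key ≤ PySem.List.pyGetD arr ((arr.length : Int) - 1) 0)
    (s e b a : Int)
    (hs : 0 ≤ s) (he : e ≤ (arr.length : Int) - 1) (hse : s ≤ e + 1)
    (hlo : s = 0 → 0 ≤ e) (hhi : e = (arr.length : Int) - 1 → s ≤ (arr.length : Int) - 1)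
    (hb : 1 ≤ s → b = PySem.List.pyGetD arr (s - 1) 0)
    (ha : e ≤ (arr.length : Int) - 2 → a = PySem.List.pyGetD arr (e + 1) 0) :
    aLoop arr key s e = goB key ((arr.drop s.toNat).take ((e + 1 - s).toNat)) b a := by
  by_cases hc : s ≤ e
  · -- one probe on each side, then recurse
    have hN1 : 1 ≤ (arr.length : Int) := by omega
    have hsublen : ((arr.drop s.toNat).take ((e + 1 - s).toNat)).length = (e + 1 - s).toNat := by
      simp only [List.length_take, List.length_drop]; omega
    have hsubne : ¬ (((arr.drop s.toNat).take ((e + 1 - s).toNat)).isEmpty = true) := by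
      simp only [List.isEmpty_iff, ← List.length_eq_zero_iff, hsublen]
      omega
    have hmA := PySem.Int.floordiv_two_mid_bounds hc
    have hfd2 : ∀ x : Int, PySem.Int.floordiv x 2 = x / 2 :=
      fun x => PySem.Int.floordiv_eq_ediv_of_pos (by norm_num)
    rw [aLoop, dif_pos hc, goB, dif_neg hsubne]
    simp only [hsublen, Int.toNat_of_nonneg (show (0:Int) ≤ e + 1 - s by omega), hfd2] at hmA ⊢
    have hv : PySem.List.pyGetD ((arr.drop s.toNat).take ((e + 1 - s).toNat)) ((e + 1 - s - 1) / 2) 0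
        = PySem.List.pyGetD arr ((s + e) / 2) 0 := by
      rw [pyGetD_drop_take arr s (e + 1 - s) _ hs (by omega) (by omega) (by omega)]
      congr 1
      omega
    rw [hv]
    simp only [beq_iff_eq]
    by_cases h1 : PySem.List.pyGetD arr ((s + e) / 2) 0 = key
    · simp [h1]
    · rw [if_neg h1, if_neg h1]
      by_cases h2 : PySem.List.pyGetD arr ((s + e) / 2) 0 < key
      · rw [if_pos h2, if_pos h2]
        rw [PySem.List.slice_from _ (by omega), List.drop_take, List.drop_drop]
        have e1 : s.toNat + ((e + 1 - s - 1) / 2 + 1).toNat = ((s + e) / 2 + 1).toNat := by omega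
        have e2 : (e + 1 - s).toNat - ((e + 1 - s - 1) / 2 + 1).toNat
            = (e + 1 - ((s + e) / 2 + 1)).toNat := by omega
        rw [e1, e2]
        have hrec := loop_eq_goB arr key hg0 hg1 ((s + e) / 2 + 1) e
            (PySem.List.pyGetD arr ((s + e) / 2) 0) a
            (by omega) he (by omega) (by omega)
            (by intro hE
                by_contra hcon
                have hmAeq : (s + e) / 2 = (arr.length : Int) - 1 := by omega
                rw [hmAeq] at h2
                omega)
            (by intro _
                congr 1
                omega)
            ha
        exact hrec
      · rw [if_neg h2, if_neg h2]
        rw [PySem.List.slice_to _ (by omega), List.take_take]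
        have e1 : min ((e + 1 - s - 1) / 2).toNat (e + 1 - s).toNat
            = ((s + e) / 2 - 1 + 1 - s).toNat := by omega
        rw [e1]
        have hrec := loop_eq_goB arr key hg0 hg1 s ((s + e) / 2 - 1)
            b (PySem.List.pyGetD arr ((s + e) / 2) 0)
            hs (by omega) (by omega)
            (by intro hs0
                by_contra hcon
                have hmAeq : (s + e) / 2 = 0 := by omega
                rw [hmAeq] at h1 h2
                omega)
            (by intro hE; omega)
            hb
            (by intro _
                congr 1
                omega)
        exact hrec
  · -- loop exit: s = e + 1; the window is empty and the candidates are the neighbours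
    have hseq : s = e + 1 := by omega
    have h1s : 1 ≤ s := by
      by_contra h
      have h0 : s = 0 := by omega
      have := hlo h0
      omega
    have heN : e ≤ (arr.length : Int) - 2 := by
      by_contra h
      have hE : e = (arr.length : Int) - 1 := by omega
      have := hhi hE
      omega
    have hempty : ((arr.drop s.toNat).take ((e + 1 - s).toNat)).isEmpty = true := by
      have h0 : (e + 1 - s).toNat = 0 := by omega
      simp [h0]
    rw [aLoop, dif_neg hc, goB, dif_pos hempty]
    rw [hb h1s, ha heN, show e + 1 = s from by omega, show s - 1 = e from by omega]
termination_by (e + 1 - s).toNat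
decreasing_by
  · omega
  · omega

-- ===== VERDICT (by name: the statement is the Claim_ definition above) =====
theorem search_min_diff_element_spec : Claim_equal_search_min_diff_element := by
  intro arr key _hdom hpre
  unfold Spec_search_min_diff_element search_min_diff_element search_min_diff_element_alt
  split_ifs with h1 h2
  · rfl
  · rfl
  · have hlen1 : 1 ≤ (arr.length : Int) := by
      have := List.length_pos_iff.mpr hpre
      omega
    have hneg : PySem.List.pyGetD arr (-1) 0
        = PySem.List.pyGetD arr ((arr.length : Int) - 1) 0 := by
      have hne : arr ≠ [] := hpre
      rw [PySem.List.pyGetD_neg_one arr 0 hne,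
          PySem.List.pyGetD_eq_getElem arr 0 (by omega) (by omega),
          List.getLast_eq_getElem hne]
      congr 1
      omega
    have hg0 : PySem.List.pyGetD arr 0 0 ≤ key := by omega
    have hg1 : key ≤ PySem.List.pyGetD arr ((arr.length : Int) - 1) 0 := by
      rw [← hneg]; omega
    have hmain := loop_eq_goB arr key hg0 hg1 0 ((arr.length : Int) - 1)
        (PySem.List.pyGetD arr 0 0) (PySem.List.pyGetD arr (-1) 0)
        le_rfl (by omega) (by omega)
        (by intro _; omega)
        (by intro _; omega)
        (by intro h; omega)
        (by intro h; omega)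
    simpa using hmain
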